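-- pv_equiv track=rewrite | github.com/Juancarlos1341/Atomacao-de-notas | app.py | gerador_de_texto_errado
-- ===== SOURCE A (Python) =====
-- def gerador_de_texto_errado(lista_de_notas, pop):
--     if pop:
--         texto = "Aviso tem um item na nota\n" \
--                 "numero da notas:"
--     else:
--         texto = "Numero das notas com o produto Item:"
--     string_numeros = '\n'
--     contador = 1
--     colunas = 0
--     for numero in lista_de_notas:
--         string_numeros += str(numero)
--         if contador % 5 == 0:
--             string_numeros += '\n'
--             colunas += 1
--         else:
--             string_numeros += ', '
--         contador += 1
--         if colunas == 5:
--             if pop: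
--                 return texto + string_numeros + '... limite ultrapassado de 25 notas'
--             return texto + string_numeros + '... limite ultrapassado de 25 notas' + '\n' + f'{len(lista_de_notas)}'
--     return texto + string_numeros + '\n' + f'quantidades de notas com item : {len(lista_de_notas)}'
-- ===== SOURCE B (Python) =====
-- def gerador_de_texto_errado(lista_de_notas, pop):
--     n = len(lista_de_notas)
--     capped = lista_de_notas[:25]
--     parts = []
--     for j in range(0, len(capped), 5):
--         chunk = capped[j:j+5]
--         if len(chunk) == 5:
--             parts.append(', '.join(str(x) for x in chunk) + '\n')
--         else:
--             parts.append(''.join(str(x) + ', ' for x in chunk))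
--     string_numeros = '\n' + ''.join(parts)
--     if pop:
--         texto = "Aviso tem um item na nota\nnumero da notas:"
--     else:
--         texto = "Numero das notas com o produto Item:"
--     if n >= 25:
--         ending = '... limite ultrapassado de 25 notas'
--         if not pop:
--             ending += '\n' + str(n)
--         return texto + string_numeros + ending
--     return texto + string_numeros + '\n' + f'quantidades de notas com item : {n}'
-- ===== Notes on version B (the rewrite author's own statement) =====
-- stated objective: simpler
-- what changed: Replaces A's element-by-element loop with contador/colunas counters and an early return by computing n once, capping the list at 25, and formatting it in chunks of five (full rows joined with ', ' plus '\n', a partial row element-wise), selecting the ending from a single n >= 25 test.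
import Mathlib
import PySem

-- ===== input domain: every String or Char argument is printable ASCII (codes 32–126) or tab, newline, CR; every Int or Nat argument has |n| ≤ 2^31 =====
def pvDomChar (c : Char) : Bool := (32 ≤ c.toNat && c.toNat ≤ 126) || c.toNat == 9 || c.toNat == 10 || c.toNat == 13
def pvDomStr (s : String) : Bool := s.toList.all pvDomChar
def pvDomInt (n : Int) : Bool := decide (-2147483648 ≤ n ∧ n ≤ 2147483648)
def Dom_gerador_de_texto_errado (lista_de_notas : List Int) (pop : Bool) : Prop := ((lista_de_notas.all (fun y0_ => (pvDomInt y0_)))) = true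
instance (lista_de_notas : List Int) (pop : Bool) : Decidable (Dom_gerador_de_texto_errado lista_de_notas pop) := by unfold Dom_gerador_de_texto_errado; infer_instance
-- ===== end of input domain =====

-- B formats the capped list in chunks of five instead of A's element-by-element counter loop; objective: simpler decomposition, same cost.

-- ===== PORT A =====
-- the for-loop of A with its accumulated string and the two counters; early return when colunas hits 5
def pvALoop (pop : Bool) (n : Int) (texto : String) :
    List Int → String → Int → Int → String
  | [], s, _, _ =>
      texto ++ s ++ "\n" ++ "quantidades de notas com item : " ++ PySem.Int.toStr n
  | numero :: rest, s, contador, colunas =>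
      let s1 := s ++ PySem.Int.toStr numero
      let s2 := if PySem.Int.mod contador 5 = 0 then s1 ++ "\n" else s1 ++ ", "
      let colunas1 := if PySem.Int.mod contador 5 = 0 then colunas + 1 else colunas
      let contador1 := contador + 1
      if colunas1 = 5 then
        if pop then texto ++ s2 ++ "... limite ultrapassado de 25 notas"
        else texto ++ s2 ++ "... limite ultrapassado de 25 notas" ++ "\n" ++ PySem.Int.toStr n
      else pvALoop pop n texto rest s2 contador1 colunas1

def gerador_de_texto_errado (lista_de_notas : List Int) (pop : Bool) : String :=
  let texto := if pop then "Aviso tem um item na nota\nnumero da notas:"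
               else "Numero das notas com o produto Item:"
  pvALoop pop (lista_de_notas.length : Int) texto lista_de_notas "\n" 1 0

-- ===== PORT B =====
-- B's chunk loop: one row per slice of five (full row joined with ', ' plus '\n'; partial row element-wise 'x, ')
def pvBRows : List Int → String
  | [] => ""
  | x :: xs =>
      let chunk := (x :: xs).take 5
      let row := if chunk.length = 5
                 then PySem.Str.join ", " (chunk.map PySem.Int.toStr) ++ "\n"
                 else PySem.Str.join "" (chunk.map (fun y => PySem.Int.toStr y ++ ", "))
      row ++ pvBRows ((x :: xs).drop 5)
  termination_by l => l.length
  decreasing_by simp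

def gerador_de_texto_errado_alt (lista_de_notas : List Int) (pop : Bool) : String :=
  let n : Int := lista_de_notas.length
  let capped := PySem.List.slice lista_de_notas none (some 25)
  let string_numeros := "\n" ++ pvBRows capped
  let texto := if pop then "Aviso tem um item na nota\nnumero da notas:"
               else "Numero das notas com o produto Item:"
  if n ≥ 25 then
    let ending := "... limite ultrapassado de 25 notas"
    let ending := if !pop then ending ++ "\n" ++ PySem.Int.toStr n else ending
    texto ++ string_numeros ++ ending
  else
    texto ++ string_numeros ++ "\n" ++ ("quantidades de notas com item : " ++ PySem.Int.toStr n)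

-- ===== PRECONDITION & SPEC =====
def Spec_gerador_de_texto_errado (lista_de_notas : List Int) (pop : Bool) (out : String) : Prop := out = gerador_de_texto_errado_alt lista_de_notas pop
instance (lista_de_notas : List Int) (pop : Bool) (out : String) : Decidable (Spec_gerador_de_texto_errado lista_de_notas pop out) := by unfold Spec_gerador_de_texto_errado; infer_instance

-- ===== CLAIM (what is proved, stated in full; the proofs are below) =====
def Claim_equal_gerador_de_texto_errado : Prop := ∀ (lista_de_notas : List Int) (pop : Bool), Dom_gerador_de_texto_errado lista_de_notas pop → Spec_gerador_de_texto_errado lista_de_notas pop (gerador_de_texto_errado lista_de_notas pop)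

-- ===== LEMMAS AND PROOFS =====

-- common normal form of the number body: each element followed by its positional separator
def pvSep (k : Nat) : String := if (k + 1) % 5 = 0 then "\n" else ", "

def pvBody : List Int → Nat → String
  | [], _ => ""
  | x :: xs, k => PySem.Int.toStr x ++ pvSep k ++ pvBody xs (k + 1)

theorem pvBody_append (a b : List Int) (k : Nat) :
    pvBody (a ++ b) k = pvBody a k ++ pvBody b (k + a.length) := by
  induction a generalizing k with
  | nil => simp [pvBody]
  | cons x xs ih =>
      simp [pvBody, ih, String.append_assoc]
      ring_nf

theorem pvALoop_eq (pop : Bool) (n : Int) (texto : String) (l : List Int) :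
    ∀ (k : Nat) (s : String), k < 25 →
    pvALoop pop n texto l s ((k : Int) + 1) ((k / 5 : Nat) : Int) =
      if l.length + k < 25 then
        texto ++ (s ++ pvBody l k) ++ "\n" ++ "quantidades de notas com item : " ++ PySem.Int.toStr n
      else
        (if pop then texto ++ (s ++ pvBody (l.take (25 - k)) k) ++ "... limite ultrapassado de 25 notas"
         else texto ++ (s ++ pvBody (l.take (25 - k)) k) ++ "... limite ultrapassado de 25 notas" ++ "\n" ++ PySem.Int.toStr n) := by
  induction l with
  | nil =>
      intro k s hk
      simp only [pvALoop, List.length_nil]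
      rw [if_pos (by omega)]
      simp [pvBody]
  | cons x xs ih =>
      intro k s hk
      have hmod : PySem.Int.mod ((k : Int) + 1) 5 = (((k + 1) % 5 : Nat) : Int) := by
        have h := PySem.Int.mod_natCast (k + 1) 5
        push_cast at h ⊢
        omega
      simp only [pvALoop]
      rw [hmod]
      have htk : (x :: xs).take (25 - k) = x :: xs.take (25 - (k + 1)) := by
        rw [show 25 - k = (25 - (k + 1)) + 1 by omega]; simp
      by_cases h5 : (k + 1) % 5 = 0
      · have h5c : (((k + 1) % 5 : Nat) : Int) = 0 := by exact_mod_cast h5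
        simp only [if_pos h5c]
        by_cases h24 : k = 24
        · subst h24
          rw [if_pos (by norm_num)]
          rw [if_neg (show ¬ ((x :: xs).length + 24 < 25) by simp only [List.length_cons]; omega)]
          rw [htk]
          rw [show 25 - (24 + 1) = 0 by omega, List.take_zero]
          cases pop <;> simp [pvBody, pvSep, String.append_assoc]
        · have hne : ¬ (((k / 5 : Nat) : Int) + 1 = 5) := by
            have : k / 5 < 4 := by omega
            push_cast; omega
          rw [if_neg hne]
          rw [show ((k : Int) + 1) + 1 = ((k + 1 : Nat) : Int) + 1 by push_cast; ring]
          rw [show ((k / 5 : Nat) : Int) + 1 = (((k + 1) / 5 : Nat) : Int) by push_cast; omega]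
          rw [ih (k + 1) _ (by omega)]
          by_cases hl : xs.length + (k + 1) < 25
          · rw [if_pos hl, if_pos (show (x :: xs).length + k < 25 by simp only [List.length_cons]; omega)]
            simp [pvBody, pvSep, h5, String.append_assoc]
          · rw [if_neg hl, if_neg (show ¬ ((x :: xs).length + k < 25) by simp only [List.length_cons]; omega)]
            rw [htk]
            cases pop <;> simp [pvBody, pvSep, h5, String.append_assoc]
      · have h5c : ¬ ((((k + 1) % 5 : Nat) : Int) = 0) := by
          intro h; exact h5 (by exact_mod_cast h)
        simp only [if_neg h5c]
        have hne : ¬ (((k / 5 : Nat) : Int) = 5) := by push_cast; omega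
        rw [if_neg hne]
        rw [show ((k : Int) + 1) + 1 = ((k + 1 : Nat) : Int) + 1 by push_cast; ring]
        rw [show ((k / 5 : Nat) : Int) = (((k + 1) / 5 : Nat) : Int) by push_cast; omega]
        rw [ih (k + 1) _ (by omega)]
        by_cases hl : xs.length + (k + 1) < 25
        · rw [if_pos hl, if_pos (show (x :: xs).length + k < 25 by simp only [List.length_cons]; omega)]
          simp [pvBody, pvSep, h5, String.append_assoc]
        · rw [if_neg hl, if_neg (show ¬ ((x :: xs).length + k < 25) by simp only [List.length_cons]; omega)]
          rw [htk]
          cases pop <;> simp [pvBody, pvSep, h5, String.append_assoc]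

theorem pvStrExt (a b : String) (h : a.toList = b.toList) : a = b := by
  rw [← @String.ofList_toList a, ← @String.ofList_toList b, h]

theorem pvJoin_cc (sep a b : String) (rest : List String) :
    PySem.Str.join sep (a :: b :: rest) = a ++ sep ++ PySem.Str.join sep (b :: rest) := by
  apply pvStrExt
  simp [PySem.Str.toList_join, PySem.Chars.join_cons_cons]

theorem pvJoin_one (sep a : String) : PySem.Str.join sep [a] = a := by
  apply pvStrExt
  simp [PySem.Str.toList_join, PySem.Chars.join, List.intercalate]

theorem pvJoin_nil (sep : String) : PySem.Str.join sep [] = "" := by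
  apply pvStrExt
  simp [PySem.Str.toList_join, PySem.Chars.join, List.intercalate]

theorem pvJoinEmpty_cons (a : String) (l : List String) :
    PySem.Str.join "" (a :: l) = a ++ PySem.Str.join "" l := by
  cases l with
  | nil => simp [pvJoin_one, pvJoin_nil]
  | cons b rest => simp [pvJoin_cc]

theorem pvPartialRow (l : List Int) : ∀ (k : Nat), l.length + k % 5 < 5 →
    PySem.Str.join "" (l.map (fun y => PySem.Int.toStr y ++ ", ")) = pvBody l k := by
  induction l with
  | nil => intro k _; simp [pvBody, pvJoin_nil]
  | cons x xs ih =>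
      intro k hk
      simp only [List.length_cons] at hk
      have h5 : (k + 1) % 5 ≠ 0 := by omega
      have hrest := ih (k + 1) (by omega)
      simp [pvBody, pvSep, h5, hrest, pvJoinEmpty_cons, String.append_assoc]

theorem pvBRows_eq (l : List Int) : ∀ (k : Nat), k % 5 = 0 → pvBRows l = pvBody l k := by
  induction l using pvBRows.induct with
  | case1 => intro k _; simp [pvBRows, pvBody]
  | case2 x xs ih =>
      intro k hk
      simp only [pvBRows]
      by_cases hlen : 4 ≤ xs.length
      · have hc : ((x :: xs).take 5).length = 5 := by
          simp only [List.length_take, List.length_cons]; omega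
        obtain ⟨a, b, c, d, e, hch⟩ : ∃ a b c d e, (x :: xs).take 5 = [a, b, c, d, e] := by
          match h : (x :: xs).take 5 with
          | [a, b, c, d, e] => exact ⟨a, b, c, d, e, rfl⟩
          | [] | [_] | [_, _] | [_, _, _] | [_, _, _, _] => rw [h] at hc; simp at hc
          | _ :: _ :: _ :: _ :: _ :: _ :: _ => rw [h] at hc; simp at hc
        have hsplit := pvBody_append ((x :: xs).take 5) ((x :: xs).drop 5) k
        rw [List.take_append_drop, hc] at hsplit
        rw [hsplit, ih (k + 5) (by omega), hch]
        have s1 : (k + 1) % 5 ≠ 0 := by omega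
        have s2 : (k + 2) % 5 ≠ 0 := by omega
        have s3 : (k + 3) % 5 ≠ 0 := by omega
        have s4 : (k + 4) % 5 ≠ 0 := by omega
        have s5 : (k + 5) % 5 = 0 := by omega
        simp [pvBody, pvSep, s1, s2, s3, s4, s5,
          show k + 1 + 1 = k + 2 by ring, show k + 2 + 1 = k + 3 by ring,
          show k + 3 + 1 = k + 4 by ring, show k + 4 + 1 = k + 5 by ring,
          pvJoin_cc, pvJoin_one, String.append_assoc]
      · have htk : (x :: xs).take 5 = x :: xs := List.take_of_length_le (by simp only [List.length_cons]; omega)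
        have hdr : (x :: xs).drop 5 = [] := List.drop_eq_nil_of_le (by simp only [List.length_cons]; omega)
        have hpart := pvPartialRow (x :: xs) k (by simp only [List.length_cons]; omega)
        rw [htk, hdr]
        rw [if_neg (show ¬ ((x :: xs).length = 5) by simp only [List.length_cons]; omega)]
        simpa [pvBRows] using hpart

-- ===== VERDICT (by name: the statement is the Claim_ definition above) =====
theorem gerador_de_texto_errado_spec : Claim_equal_gerador_de_texto_errado := by
  intro l pop _
  unfold Spec_gerador_de_texto_errado gerador_de_texto_errado gerador_de_texto_errado_alt
  have hA := pvALoop_eq pop (l.length : Int)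
    (if pop then "Aviso tem um item na nota\nnumero da notas:" else "Numero das notas com o produto Item:")
    l 0 "\n" (by omega)
  simp only [Nat.cast_zero, Nat.zero_div, zero_add] at hA
  rw [hA]
  dsimp only
  rw [show (25 : Int) = ((25 : Nat) : Int) by norm_num, PySem.List.slice_to_natCast]
  by_cases hl : l.length < 25
  · rw [if_pos (show l.length + 0 < 25 by omega),
        if_neg (show ¬ ((l.length : Int) ≥ ((25 : Nat) : Int)) by push_cast; omega)]
    have : l.take 25 = l := List.take_of_length_le (by omega)
    rw [this, pvBRows_eq l 0 rfl]
    cases pop <;> (simp [String.append_assoc]; rw [← String.append_assoc]; simp)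
  · rw [if_neg (show ¬ (l.length + 0 < 25) by omega),
        if_pos (show (l.length : Int) ≥ ((25 : Nat) : Int) by push_cast; omega)]
    rw [pvBRows_eq (l.take 25) 0 rfl]
    simp only [Nat.sub_zero]
    cases pop <;> simp [String.append_assoc]
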